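-- pv_equiv track=rewrite | github.com/MrBrantCode/unitest_baseline | mut_generate/mist_train_taco/taco_12481/solution.py | NthTerm
-- ===== SOURCE A (Python) =====
-- def NthTerm(N: int) -> int:
--     if N == 1:
--         return 2
--     if N == 2:
--         return 2
--     smallerOut = NthTerm(N - 2)
--     if N % 2 == 0:
--         return smallerOut ** 3
--     else:
--         return smallerOut ** 2
-- ===== SOURCE B (Python) =====
-- def NthTerm(N: int) -> int:
--     if N < 1:
--         raise ValueError("N must be a positive term index")
--     if N <= 2:
--         return 2
--     if N % 2 == 1:
--         return 2 ** (2 ** ((N - 1) // 2))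
--     return 2 ** (3 ** ((N - 2) // 2))
-- ===== Notes on version B (the rewrite author's own statement) =====
-- stated objective: simpler
-- what changed: Replaces the O(N)-depth two-step recursion by a closed-form formula: 2**(2**((N-1)//2)) for odd N, 2**(3**((N-2)//2)) for even N.
import Mathlib
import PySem

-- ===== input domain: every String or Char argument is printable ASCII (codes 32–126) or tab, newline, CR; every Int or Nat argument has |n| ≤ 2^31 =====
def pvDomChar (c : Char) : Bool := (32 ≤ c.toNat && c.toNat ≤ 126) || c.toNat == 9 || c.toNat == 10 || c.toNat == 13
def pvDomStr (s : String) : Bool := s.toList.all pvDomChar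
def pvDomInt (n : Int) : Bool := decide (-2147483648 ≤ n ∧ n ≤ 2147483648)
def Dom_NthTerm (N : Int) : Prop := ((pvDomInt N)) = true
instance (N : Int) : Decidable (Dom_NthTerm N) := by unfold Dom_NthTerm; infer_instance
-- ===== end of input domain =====

-- B replaces A's O(N)-depth two-step recursion by a closed-form parity formula (objective: simpler).

-- ===== PORT A =====
-- A recurses on N-2; fuel = N.toNat bounds the depth (fuel 0 is never reached when 1 ≤ N).
def NthTermGo : Nat → Int → Int
  | 0, _ => 0
  | fuel + 1, N =>
    if N = 1 then 2
    else if N = 2 then 2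
    else
      let smallerOut := NthTermGo fuel (N - 2)
      if PySem.Int.mod N 2 = 0 then smallerOut ^ 3 else smallerOut ^ 2

def NthTerm (N : Int) : Int := NthTermGo N.toNat N

-- ===== PORT B =====
-- Source B raises ValueError for N < 1 (outside Pre_); the port returns 0 there (unreached under Pre_).
def NthTerm_alt (N : Int) : Int :=
  if N < 1 then 0
  else if N ≤ 2 then 2
  else if PySem.Int.mod N 2 = 1 then
    (2 : Int) ^ ((2 : Int) ^ (PySem.Int.floordiv (N - 1) 2).toNat).toNat
  else
    (2 : Int) ^ ((3 : Int) ^ (PySem.Int.floordiv (N - 2) 2).toNat).toNat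

-- ===== PRECONDITION & SPEC =====
-- For N ≤ 0 the Python A never hits a base case and raises RecursionError; Pre_ admits exactly the N ≥ 1 on which A returns.
def Pre_NthTerm (N : Int) : Prop := 1 ≤ N
instance (N : Int) : Decidable (Pre_NthTerm N) := by unfold Pre_NthTerm; infer_instance
def pvWitness_NthTerm : Int := (5)

def Spec_NthTerm (N : Int) (out : Int) : Prop := out = NthTerm_alt N
instance (N : Int) (out : Int) : Decidable (Spec_NthTerm N out) := by unfold Spec_NthTerm; infer_instance

-- ===== CLAIM (what is proved, stated in full; the proofs are below) =====
def Claim_equal_NthTerm : Prop := ∀ (N : Int), Dom_NthTerm N → Pre_NthTerm N → Spec_NthTerm N (NthTerm N)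

-- ===== LEMMAS AND PROOFS =====

theorem toNat_two_pow (k : Nat) : ((2 : Int) ^ k).toNat = 2 ^ k := by
  have : (2 : Int) ^ k = ((2 ^ k : Nat) : Int) := by push_cast; ring
  rw [this, Int.toNat_natCast]

theorem toNat_three_pow (k : Nat) : ((3 : Int) ^ k).toNat = 3 ^ k := by
  have : (3 : Int) ^ k = ((3 ^ k : Nat) : Int) := by push_cast; ring
  rw [this, Int.toNat_natCast]

theorem alt_odd (N : Int) (h3 : 3 ≤ N) (ho : N % 2 = 1) :
    NthTerm_alt N = 2 ^ (2 ^ ((N - 1) / 2).toNat) := by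
  unfold NthTerm_alt
  rw [PySem.Int.floordiv_eq_ediv_of_pos (by omega)]
  have hm : PySem.Int.mod N 2 = N % 2 := PySem.Int.mod_eq_emod_of_pos (by omega)
  rw [if_neg (by omega), if_neg (by omega), hm, if_pos ho, toNat_two_pow]

theorem alt_even (N : Int) (h4 : 4 ≤ N) (he : N % 2 = 0) :
    NthTerm_alt N = 2 ^ (3 ^ ((N - 2) / 2).toNat) := by
  unfold NthTerm_alt
  rw [if_neg (by omega)]
  have hm : PySem.Int.mod N 2 = N % 2 := PySem.Int.mod_eq_emod_of_pos (by omega)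
  rw [if_neg (by omega), hm, if_neg (by omega),
    PySem.Int.floordiv_eq_ediv_of_pos (by omega), toNat_three_pow]

theorem alt_base (N : Int) (h1 : 1 ≤ N) (h2 : N ≤ 2) : NthTerm_alt N = 2 := by
  unfold NthTerm_alt
  rw [if_neg (by omega), if_pos h2]

theorem go_eq : ∀ (fuel : Nat) (N : Int), 1 ≤ N → N ≤ (fuel : Int) →
    NthTermGo fuel N = NthTerm_alt N := by
  intro fuel
  induction fuel with
  | zero => intro N _ h2; omega
  | succ fuel ih =>
    intro N h1 h2
    by_cases e1 : N = 1
    · subst e1; simp [NthTermGo, alt_base]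
    by_cases e2 : N = 2
    · subst e2; simp [NthTermGo, alt_base]
    have h3 : 3 ≤ N := by omega
    have hm : PySem.Int.mod N 2 = N % 2 := PySem.Int.mod_eq_emod_of_pos (by omega)
    have hrec : NthTermGo fuel (N - 2) = NthTerm_alt (N - 2) :=
      ih (N - 2) (by omega) (by push_cast at h2 ⊢; omega)
    simp only [NthTermGo, if_neg e1, if_neg e2, hm, hrec]
    rcases Int.emod_two_eq N with he | ho
    · -- even, N ≥ 4
      rw [if_pos he, alt_even N (by omega) he]
      by_cases e4 : N = 4
      · subst e4; norm_num [alt_base]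
      · have h6 : 6 ≤ N := by omega
        rw [alt_even (N - 2) (by omega) (by omega)]
        have hexp : ((N - 2) / 2).toNat = ((N - 2 - 2) / 2).toNat + 1 := by omega
        rw [hexp, pow_succ (3 : ℕ), pow_mul]
    · -- odd, N ≥ 3
      rw [if_neg (by omega), alt_odd N h3 ho]
      by_cases e3 : N = 3
      · subst e3; norm_num [alt_base]
      · have h5 : 5 ≤ N := by omega
        rw [alt_odd (N - 2) (by omega) (by omega)]
        have hexp : ((N - 1) / 2).toNat = ((N - 2 - 1) / 2).toNat + 1 := by omega
        rw [hexp, pow_succ (2 : ℕ), pow_mul]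

-- ===== VERDICT (by name: the statement is the Claim_ definition above) =====
theorem NthTerm_spec : Claim_equal_NthTerm := by
  intro N _ hP
  show NthTerm N = NthTerm_alt N
  exact go_eq N.toNat N hP (by omega)
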